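-- pv_equiv track=rewrite | github.com/NEXTAltair/genai-tag-db-tools | src/genai_tag_db_tools/utils/cleanup_str.py | _tags_to_dict
-- ===== SOURCE A (Python) =====
-- def _tags_to_dict(tags: str) -> dict[int, str]:
--     """タグを辞書に変換して重複を避ける
--     Args:
--         tags (str): タグ
--     Returns:
--         tags_dict (dict): タグの辞書
--     """
--     tag_list = [tag.strip() for tag in tags.split(",") if tag.strip()]
--     seen_tags = set()
--     tags_dict = {}
--     for i, tag in enumerate(tag_list):
--         if tag not in seen_tags:
--             seen_tags.add(tag)
--             tags_dict[i] = tag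
--     return tags_dict
-- ===== SOURCE B (Python) =====
-- def _tags_to_dict(tags: str) -> dict[int, str]:
--     """タグを辞書に変換して重複を避ける (backward overwrite pass, then sort by index)"""
--     tag_list = [tag.strip() for tag in tags.split(",") if tag.strip()]
--     first = {}
--     for i in range(len(tag_list) - 1, -1, -1):
--         first[tag_list[i]] = i
--     return {i: tag for tag, i in sorted(first.items(), key=lambda item: item[1])}
-- ===== Notes on version B (the rewrite author's own statement) =====
-- stated objective: alternative
-- what changed: A's forward enumerate pass with a seen-set that skips duplicates is replaced by a backward index loop that overwrites a tag->index dict (so the first occurrence wins last) followed by sorting the (tag, index) pairs by index to rebuild the index-keyed dict.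
import Mathlib
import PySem

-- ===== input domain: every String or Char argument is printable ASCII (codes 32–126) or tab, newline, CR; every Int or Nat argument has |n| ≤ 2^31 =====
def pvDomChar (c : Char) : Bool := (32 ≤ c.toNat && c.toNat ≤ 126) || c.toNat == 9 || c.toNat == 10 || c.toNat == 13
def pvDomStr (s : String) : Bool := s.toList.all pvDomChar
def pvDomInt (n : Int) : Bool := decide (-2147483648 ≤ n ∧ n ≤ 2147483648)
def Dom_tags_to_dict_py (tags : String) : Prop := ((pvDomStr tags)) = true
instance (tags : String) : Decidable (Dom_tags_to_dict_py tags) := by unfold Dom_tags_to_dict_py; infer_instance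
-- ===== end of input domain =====

-- B replaces A's forward seen-set pass by a backward overwrite pass (tag -> index, first
-- occurrence wins last) followed by a sort of the pairs by index (objective: alternative;
-- same results; not claimed faster).

-- ===== PORT A =====
-- shared preprocessing line (identical in both Pythons): [tag.strip() for tag in tags.split(",") if tag.strip()]
-- sep is the literal "," ≠ "", so split? always returns some; the .getD [] is never taken
def pvTagList (tags : String) : List String :=
  (((PySem.Str.split? tags ",").getD []).filter (fun t => PySem.Str.strip t ≠ "")).map PySem.Str.strip

def tags_to_dict_py (tags : String) : List (Int × String) :=
  let tagList := pvTagList tags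
  let st := (PySem.List.enumerate tagList 0).foldl
    (fun (st : PySem.Set String × PySem.Dict Int String) it =>
      if PySem.Set.contains st.1 it.2 then st
      else (PySem.Set.add st.1 it.2, PySem.Dict.insert st.2 it.1 it.2))
    (PySem.Set.empty, PySem.Dict.empty)
  (st.2).items

-- ===== PORT B =====
-- for i in range(len(tag_list)-1, -1, -1): first[tag_list[i]] = i
-- i is always a valid index, so tag_list[i] never raises; ported as pyGetD tagList i ""
def tags_to_dict_py_alt (tags : String) : List (Int × String) :=
  let tagList := pvTagList tags
  let first := (PySem.List.pyRange (PySem.List.len tagList - 1) (-1) (-1)).foldl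
    (fun (d : PySem.Dict String Int) i => d.insert (PySem.List.pyGetD tagList i "") i)
    PySem.Dict.empty
  ((PySem.List.sorted first.items (fun item => item.2) false).foldl
    (fun (d : PySem.Dict Int String) p => d.insert p.2 p.1)
    PySem.Dict.empty).items

-- ===== PRECONDITION & SPEC =====
def Spec_tags_to_dict_py (tags : String) (out : List (Int × String)) : Prop := out = tags_to_dict_py_alt tags
instance (tags : String) (out : List (Int × String)) : Decidable (Spec_tags_to_dict_py tags out) := by unfold Spec_tags_to_dict_py; infer_instance

-- ===== CLAIM (what is proved, stated in full; the proofs are below) =====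
def Claim_equal_tags_to_dict_py : Prop := ∀ (tags : String), Dom_tags_to_dict_py tags → Spec_tags_to_dict_py tags (tags_to_dict_py tags)

-- ===== LEMMAS AND PROOFS =====

-- first-occurrence pairs: unique tags in appearance order, each with its first index in L
def pvPairs (L : List String) : List (Int × String) :=
  (PySem.List.dedup L).map (fun t => ((L.idxOf t : Int), t))

lemma pv_ofList_snoc (L : List String) (t : String) :
    PySem.Set.ofList (L ++ [t]) = PySem.Set.add (PySem.Set.ofList L) t := by
  rw [PySem.Set.ofList_eq_foldl, PySem.Set.ofList_eq_foldl, List.foldl_append]; rfl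

lemma pv_dedup_snoc_mem (L : List String) (t : String) (h : t ∈ L) :
    PySem.List.dedup (L ++ [t]) = PySem.List.dedup L := by
  rw [PySem.List.dedup_eq_ofList, PySem.List.dedup_eq_ofList, pv_ofList_snoc]
  simp [PySem.Set.add, PySem.Set.mem_ofList, h]

lemma pv_dedup_snoc_not (L : List String) (t : String) (h : t ∉ L) :
    PySem.List.dedup (L ++ [t]) = PySem.List.dedup L ++ [t] := by
  rw [PySem.List.dedup_eq_ofList, PySem.List.dedup_eq_ofList, pv_ofList_snoc]
  simp [PySem.Set.add, PySem.Set.mem_ofList, h]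

lemma pv_pairs_snoc_mem (L : List String) (t : String) (h : t ∈ L) :
    pvPairs (L ++ [t]) = pvPairs L := by
  unfold pvPairs
  rw [pv_dedup_snoc_mem L t h]
  exact List.map_congr_left (fun u hu => by
    rw [List.idxOf_append_of_mem ((PySem.List.mem_dedup L u).mp hu)])

lemma pv_idxOf_snoc_not (L : List String) (t : String) (h : t ∉ L) :
    List.idxOf t (L ++ [t]) = L.length := by
  rw [List.idxOf_append]
  simp [h]

lemma pv_pairs_snoc_not (L : List String) (t : String) (h : t ∉ L) :
    pvPairs (L ++ [t]) = pvPairs L ++ [((L.length : Int), t)] := by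
  unfold pvPairs
  rw [pv_dedup_snoc_not L t h, List.map_append]
  congr 1
  · exact List.map_congr_left (fun u hu => by
      rw [List.idxOf_append_of_mem ((PySem.List.mem_dedup L u).mp hu)])
  · simp only [List.map_cons, List.map_nil]
    rw [pv_idxOf_snoc_not L t h]

lemma pv_contains_pairs (L : List String) :
    (PySem.Dict.mk (pvPairs L)).contains ((L.length : Int)) = false := by
  rw [Bool.eq_false_iff]
  intro hc
  have hk := (PySem.Dict.contains_iff_mem_keys _ _).mp hc
  simp only [PySem.Dict.keys, pvPairs, List.map_map] at hk
  obtain ⟨u, hu, he⟩ := List.mem_map.mp hk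
  have hmem : u ∈ L := (PySem.List.mem_dedup L u).mp hu
  have hlt : List.idxOf u L < L.length := List.idxOf_lt_length_of_mem hmem
  simp only [Function.comp] at he
  omega

lemma pv_loopA (L : List String) :
    (PySem.List.enumerate L 0).foldl
      (fun (st : PySem.Set String × PySem.Dict Int String) it =>
        if PySem.Set.contains st.1 it.2 then st
        else (PySem.Set.add st.1 it.2, PySem.Dict.insert st.2 it.1 it.2))
      (PySem.Set.empty, PySem.Dict.empty)
    = (PySem.Set.ofList L, PySem.Dict.mk (pvPairs L)) := by
  induction L using List.reverseRecOn with
  | nil => rfl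
  | append_singleton L t ih =>
    rw [PySem.List.enumerate_append, List.foldl_append, ih]
    simp only [PySem.List.enumerate_cons, PySem.List.enumerate_nil, List.foldl_cons, List.foldl_nil,
      zero_add]
    rw [pv_ofList_snoc L t, PySem.Set.contains_eq_decide]
    by_cases h : t ∈ L
    · simp only [PySem.Set.mem_ofList, h, decide_true, if_true]
      rw [pv_pairs_snoc_mem L t h]
      congr 1
      simp [PySem.Set.add, PySem.Set.mem_ofList, h]
    · simp only [PySem.Set.mem_ofList, h, decide_false, Bool.false_eq_true, if_false]
      refine Prod.ext rfl ?_
      apply PySem.Dict.ext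
      show (PySem.Dict.insert ⟨pvPairs L⟩ ((L.length : Int)) t).items = pvPairs (L ++ [t])
      rw [PySem.Dict.items_insert_of_not_contains _ _ (pv_contains_pairs L),
        pv_pairs_snoc_not L t h]

-- ===== B-side lemmas =====

-- the backward index loop, generalized over the starting dict
def pvFold (L : List String) (d0 : PySem.Dict String Int) : PySem.Dict String Int :=
  ((PySem.List.pyRange 0 (L.length : Int) 1).reverse).foldl
    (fun d i => d.insert (PySem.List.pyGetD L i "") i) d0

lemma pv_fold_snoc (L : List String) (t : String) (d0 : PySem.Dict String Int) :
    pvFold (L ++ [t]) d0 = pvFold L (d0.insert t (L.length : Int)) := by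
  unfold pvFold
  have hlen : ((L ++ [t]).length : Int) = (L.length : Int) + 1 := by
    simp
  rw [hlen, PySem.List.pyRange_one_succ_right (by positivity), List.reverse_append]
  simp only [List.reverse_singleton, List.singleton_append, List.foldl_cons]
  have hget : PySem.List.pyGetD (L ++ [t]) (L.length : Int) "" = t := by
    rw [PySem.List.pyGetD_natCast]
    simp
  rw [hget]
  apply PySem.List.foldl_congr_mem
  intro d i hi
  have hi' : 0 ≤ i ∧ i < (L.length : Int) := by
    have := (PySem.List.mem_pyRange_one).mp (List.mem_reverse.mp hi)
    omega
  have : PySem.List.pyGetD (L ++ [t]) i "" = PySem.List.pyGetD L i "" := by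
    obtain ⟨k, rfl⟩ : ∃ k : Nat, i = (k : Int) := ⟨i.toNat, (Int.toNat_of_nonneg hi'.1).symm⟩
    rw [PySem.List.pyGetD_natCast, PySem.List.pyGetD_natCast]
    have hk : k < L.length := by exact_mod_cast hi'.2
    simp [List.getD, List.getElem?_append_left hk]
  rw [this]

lemma pv_get_fold (L : List String) :
    ∀ (d0 : PySem.Dict String Int) (u : String),
      (pvFold L d0).get? u = if u ∈ L then some ((L.idxOf u : Int)) else d0.get? u := by
  induction L using List.reverseRecOn with
  | nil => intro d0 u; simp [pvFold]
  | append_singleton L t ih =>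
    intro d0 u
    rw [pv_fold_snoc, ih]
    by_cases hu : u ∈ L
    · simp [hu, List.idxOf_append_of_mem hu]
    · by_cases hut : u = t
      · subst hut
        simp [hu, pv_idxOf_snoc_not L u hu, PySem.Dict.get?_insert_self]
      · have : u ∉ L ++ [t] := by simp [hu, hut]
        simp only [hu, if_false, this]
        exact PySem.Dict.get?_insert_of_ne d0 _ hut

lemma pv_keys_fold_nodup (L : List String) : (pvFold L PySem.Dict.empty).keys.Nodup := by
  unfold pvFold
  exact PySem.Dict.nodup_keys_foldl_insert_key _ _ _ _ (by simp [PySem.Dict.keys_empty])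

lemma pv_mem_keys_fold (L : List String) (u : String) :
    u ∈ (pvFold L PySem.Dict.empty).keys ↔ u ∈ L := by
  constructor
  · intro h
    by_contra hu
    have := pv_get_fold L PySem.Dict.empty u
    rw [if_neg hu, PySem.Dict.get?_empty] at this
    exact (PySem.Dict.get?_eq_none_iff_not_mem_keys _ _).mp this h
  · intro h
    by_contra hk
    have := pv_get_fold L PySem.Dict.empty u
    rw [if_pos h, (PySem.Dict.get?_eq_none_iff_not_mem_keys _ _).mpr hk] at this
    simp at this

lemma pv_items_fold (L : List String) :
    (pvFold L PySem.Dict.empty).items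
      = (pvFold L PySem.Dict.empty).keys.map (fun t => (t, ((L.idxOf t : Int)))) := by
  rw [PySem.Dict.items_eq_map_keys _ (pv_keys_fold_nodup L) 0]
  exact List.map_congr_left (fun u hu => by
    have hm : u ∈ L := (pv_mem_keys_fold L u).mp hu
    rw [PySem.Dict.getD_eq_get?_getD, pv_get_fold, if_pos hm]
    rfl)

lemma pv_dedup_pairwise (L : List String) :
    (PySem.List.dedup L).Pairwise (fun a b => L.idxOf a < L.idxOf b) := by
  induction L using List.reverseRecOn with
  | nil => simp [PySem.List.dedup]
  | append_singleton L t ih =>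
    by_cases h : t ∈ L
    · rw [pv_dedup_snoc_mem L t h]
      refine ih.imp_of_mem ?_
      intro a b ha hb hab
      rw [List.idxOf_append_of_mem ((PySem.List.mem_dedup L a).mp ha),
        List.idxOf_append_of_mem ((PySem.List.mem_dedup L b).mp hb)]
      exact hab
    · rw [pv_dedup_snoc_not L t h]
      rw [List.pairwise_append]
      refine ⟨ih.imp_of_mem ?_, List.pairwise_singleton _ _, ?_⟩
      · intro a b ha hb hab
        rw [List.idxOf_append_of_mem ((PySem.List.mem_dedup L a).mp ha),
          List.idxOf_append_of_mem ((PySem.List.mem_dedup L b).mp hb)]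
        exact hab
      · intro a ha b hb
        rw [List.mem_singleton] at hb; rw [hb]
        have haL : a ∈ L := (PySem.List.mem_dedup L a).mp ha
        rw [List.idxOf_append_of_mem haL, pv_idxOf_snoc_not L t h]
        exact List.idxOf_lt_length_of_mem haL

lemma pv_sorted_items (L : List String) :
    PySem.List.sorted (pvFold L PySem.Dict.empty).items (fun item => item.2) false
      = (PySem.List.dedup L).map (fun t => (t, ((L.idxOf t : Int)))) := by
  apply PySem.List.sorted_eq_of_perm_of_pairwise_lt
  · rw [pv_items_fold]
    apply List.Perm.map
    apply (List.perm_ext_iff_of_nodup (PySem.List.nodup_dedup L) (pv_keys_fold_nodup L)).mpr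
    intro u
    rw [PySem.List.mem_dedup, pv_mem_keys_fold]
  · rw [List.pairwise_map]
    refine (pv_dedup_pairwise L).imp ?_
    intro a b hab
    show (L.idxOf a : Int) < (L.idxOf b : Int)
    exact_mod_cast hab

lemma pv_loopB (L : List String) :
    ((PySem.List.sorted (pvFold L PySem.Dict.empty).items (fun item => item.2) false).foldl
      (fun (d : PySem.Dict Int String) p => d.insert p.2 p.1)
      PySem.Dict.empty).items = pvPairs L := by
  rw [pv_sorted_items, List.foldl_map]
  rw [PySem.Dict.items_foldl_insert_fresh
        (PySem.List.dedup L)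
        (fun t => ((L.idxOf t : Int)))
        (fun t => t) PySem.Dict.empty
        (fun a _ => PySem.Dict.contains_empty _)
        ?nodup]
  · rfl
  case nodup =>
    have hp : ((PySem.List.dedup L).map (fun t => ((L.idxOf t : Int)))).Pairwise (· < ·) := by
      rw [List.pairwise_map]
      refine (pv_dedup_pairwise L).imp ?_
      intro a b hab
      show (L.idxOf a : Int) < (L.idxOf b : Int)
      exact_mod_cast hab
    exact hp.imp ne_of_lt

-- ===== VERDICT (by name: the statement is the Claim_ definition above) =====
theorem tags_to_dict_py_spec : Claim_equal_tags_to_dict_py := by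
  intro tags _
  show tags_to_dict_py tags = tags_to_dict_py_alt tags
  simp only [tags_to_dict_py, tags_to_dict_py_alt]
  rw [pv_loopA]
  have hrange : PySem.List.pyRange (PySem.List.len (pvTagList tags) - 1) (-1) (-1)
      = (PySem.List.pyRange 0 ((pvTagList tags).length : Int) 1).reverse := by
    rw [PySem.List.pyRange_neg_one_eq_reverse]
    norm_num [PySem.List.len_eq]
  rw [hrange]
  exact (pv_loopB (pvTagList tags)).symm
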